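-- pv_equiv track=rewrite | github.com/tommywalsh/word-game-ai | matching.py | _get_subreports
-- ===== SOURCE A (Python) =====
-- def _generate_subreport_given_indices(word, matching_indices):
--     report = {}
--     for index in matching_indices:
--         letter = word[index]
--         if letter in report:
--             report[letter].append(index)
--         else:
--             report[letter] = [index]
--     return report
--
-- def _get_subreports(word, results):
--     exact_indices = []
--     partial_indices = []
--     nonmatch_indices = []
--     for index in range(5):
--         result = results[index]
--         if result == 'g':
--             exact_indices.append(index)
--         elif result == 'y':
--             partial_indices.append(index)
--         else:
--             nonmatch_indices.append(index)
--
--     exact_report = _generate_subreport_given_indices(word, exact_indices)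
--     partial_report = _generate_subreport_given_indices(word, partial_indices)
--
--     # A "grey" square only indicates a nonmatching letter if that same letter isn't already a partial or exact match.
--     nonmatching_letters = []
--     for index in nonmatch_indices:
--         letter = word[index]
--         if letter not in exact_report and letter not in partial_report:
--             nonmatching_letters.append(letter)
--
--     return exact_report, partial_report, set(nonmatching_letters)
-- ===== SOURCE B (Python) =====
-- def _get_subreports(word, results):
--     # Group-by-letter via comprehensions: for each distinct flagged letter,
--     # collect all of its indices with an inner scan (no incremental dict mutation).
--     def grouped(flag):
--         letters = [word[i] for i in range(5) if results[i] == flag]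
--         return {c: [i for i in range(5) if results[i] == flag and word[i] == c]
--                 for c in letters}
--
--     exact_report = grouped('g')
--     partial_report = grouped('y')
--     nonmatching = {word[i] for i in range(5)
--                    if results[i] != 'g' and results[i] != 'y'
--                    and word[i] not in exact_report and word[i] not in partial_report}
--     return exact_report, partial_report, nonmatching
-- ===== Notes on version B (the rewrite author's own statement) =====
-- stated objective: alternative
-- what changed: B replaces A's incremental group-by (classify indices into three lists, then mutate a dict per index with append-or-create) by a declarative per-letter grouping: a dict comprehension that, for each flagged letter, rescans range(5) to collect all its indices at once, and a set comprehension for the grey letters; no index lists, no helper, no dict mutation.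
import Mathlib
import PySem

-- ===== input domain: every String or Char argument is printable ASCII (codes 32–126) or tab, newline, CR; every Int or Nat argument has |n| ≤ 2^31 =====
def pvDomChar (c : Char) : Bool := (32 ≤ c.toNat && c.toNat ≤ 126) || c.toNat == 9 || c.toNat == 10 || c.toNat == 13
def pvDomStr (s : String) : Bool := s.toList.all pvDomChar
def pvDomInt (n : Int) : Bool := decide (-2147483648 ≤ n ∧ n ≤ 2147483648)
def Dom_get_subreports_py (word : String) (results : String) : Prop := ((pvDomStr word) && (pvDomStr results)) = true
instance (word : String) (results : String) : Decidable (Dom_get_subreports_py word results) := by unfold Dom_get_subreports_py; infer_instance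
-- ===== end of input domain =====

-- B replaces A's incremental index-classification + append-to-dict grouping by per-letter
-- comprehension rescans; only the RETURN value is compared (A mutates nothing).


-- ===== PORT A =====
-- helper _generate_subreport_given_indices (word[index] is exact under Pre_; pyGetD default ' ' is never read there)
def pvGenSubreport (word : List Char) (matching_indices : List Int) : PySem.Dict String (List Int) :=
  matching_indices.foldl
    (fun report index =>
      let letter := String.ofList [PySem.List.pyGetD word index ' ']
      if report.contains letter then
        report.modify letter [] (fun l => l ++ [index])
      else
        report.insert letter [index])
    PySem.Dict.empty

def get_subreports_py (word : String) (results : String) : (List (String × List Int)) × (List (String × List Int)) × List String :=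
  let w := word.toList
  let r := results.toList
  let cls := (PySem.List.pyRange 0 5 1).foldl
    (fun (st : List Int × List Int × List Int) index =>
      let result := PySem.List.pyGetD r index ' '
      if result == 'g' then (st.1 ++ [index], st.2.1, st.2.2)
      else if result == 'y' then (st.1, st.2.1 ++ [index], st.2.2)
      else (st.1, st.2.1, st.2.2 ++ [index]))
    ([], [], [])
  let exact_report := pvGenSubreport w cls.1
  let partial_report := pvGenSubreport w cls.2.1
  let nonmatching_letters := cls.2.2.foldl
    (fun acc index =>
      let letter := String.ofList [PySem.List.pyGetD w index ' ']
      if !exact_report.contains letter && !partial_report.contains letter then acc ++ [letter] else acc)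
    []
  (exact_report.items, partial_report.items, PySem.Set.ofList nonmatching_letters)

-- ===== PORT B =====
-- grouped(flag): dict comprehension over the flagged letters; each value rescans range(5)
def pvGrouped (w r : List Char) (flag : Char) : PySem.Dict String (List Int) :=
  let letters := ((PySem.List.pyRange 0 5 1).filter
      (fun i => PySem.List.pyGetD r i ' ' == flag)).map
      (fun i => String.ofList [PySem.List.pyGetD w i ' '])
  letters.foldl
    (fun d c => d.insert c ((PySem.List.pyRange 0 5 1).filter
        (fun i => PySem.List.pyGetD r i ' ' == flag
          && String.ofList [PySem.List.pyGetD w i ' '] == c)))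
    PySem.Dict.empty

def get_subreports_py_alt (word : String) (results : String) : (List (String × List Int)) × (List (String × List Int)) × List String :=
  let w := word.toList
  let r := results.toList
  let exact_report := pvGrouped w r 'g'
  let partial_report := pvGrouped w r 'y'
  let nonmatching := PySem.Set.ofList
    (((PySem.List.pyRange 0 5 1).filter (fun i =>
        !(PySem.List.pyGetD r i ' ' == 'g') &&
        (!(PySem.List.pyGetD r i ' ' == 'y') &&
        (!(exact_report.contains (String.ofList [PySem.List.pyGetD w i ' '])) &&
         !(partial_report.contains (String.ofList [PySem.List.pyGetD w i ' '])))))).map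
      (fun i => String.ofList [PySem.List.pyGetD w i ' ']))
  (exact_report.items, partial_report.items, nonmatching)

-- ===== PRECONDITION & SPEC =====
-- A indexes results[0..4] and word[0..4]; shorter strings raise IndexError, so exactly those are excluded.
def Pre_get_subreports_py (word : String) (results : String) : Prop :=
  5 ≤ word.toList.length ∧ 5 ≤ results.toList.length
instance (word : String) (results : String) : Decidable (Pre_get_subreports_py word results) := by
  unfold Pre_get_subreports_py; infer_instance

def pvWitness_get_subreports_py : String × String := ("crane", "gyxgy")

def Spec_get_subreports_py (word : String) (results : String) (out : (List (String × List Int)) × (List (String × List Int)) × List String) : Prop := out = get_subreports_py_alt word results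
instance (word : String) (results : String) (out : (List (String × List Int)) × (List (String × List Int)) × List String) : Decidable (Spec_get_subreports_py word results out) := by unfold Spec_get_subreports_py; infer_instance

-- ===== CLAIM (what is proved, stated in full; the proofs are below) =====
def Claim_equal_get_subreports_py : Prop := ∀ (word : String) (results : String), Dom_get_subreports_py word results → Pre_get_subreports_py word results → Spec_get_subreports_py word results (get_subreports_py word results)

-- ===== LEMMAS AND PROOFS =====

-- the letter at index i, shared key function of both ports
def pvKey (w : List Char) (i : Int) : String := String.ofList [PySem.List.pyGetD w i ' ']

-- A's per-index "append or create" step is an unconditional Dict.modify.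
theorem pvStep_eq_modify (d : PySem.Dict String (List Int)) (k : String) (i : Int) :
    (if d.contains k then d.modify k [] (fun l => l ++ [i]) else d.insert k [i])
      = d.modify k [] (fun l => l ++ [i]) := by
  by_cases h : d.contains k = true
  · simp [h]
  · have h' : d.contains k = false := by simpa using h
    simp [h', PySem.Dict.modify, PySem.Dict.insert, PySem.Dict.getD_of_not_contains d [] h']

-- lookup in a fold of inserts whose values do not depend on the dict
theorem getD_foldl_insert_const (v : String → List Int) :
    ∀ (cs : List String) (d : PySem.Dict String (List Int)) (x : String),
      (cs.foldl (fun d c => d.insert c (v c)) d).getD x []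
        = if x ∈ cs then v x else d.getD x [] := by
  intro cs
  induction cs with
  | nil => simp
  | cons c t ih =>
    intro d x
    rw [List.foldl_cons, ih]
    by_cases hm : x ∈ t
    · simp [hm]
    · by_cases hx : x = c <;> simp [hm, hx, PySem.Dict.getD_insert]

-- A's incremental group-by dict equals B's per-letter comprehension dict.
theorem pvGenSubreport_eq_grouped (w : List Char) (l : List Int) :
    pvGenSubreport w l
      = (l.map (pvKey w)).foldl
          (fun d c => d.insert c (l.filter (fun i => pvKey w i == c)))
          PySem.Dict.empty := by
  have hL : pvGenSubreport w l
      = l.foldl (fun d i => d.modify (pvKey w i) [] (fun v => v ++ [i])) PySem.Dict.empty := by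
    unfold pvGenSubreport pvKey
    congr 1
    funext d i
    exact pvStep_eq_modify d (String.ofList [PySem.List.pyGetD w i ' ']) i
  rw [hL]
  apply PySem.Dict.ext
  have hkL : (l.foldl (fun d i => d.modify (pvKey w i) [] (fun v => v ++ [i]))
      PySem.Dict.empty).keys = PySem.Set.ofList (l.map (pvKey w)) := by
    rw [PySem.Dict.keys_foldl_modify_key l (pvKey w) [] (fun _ i v => v ++ [i]) PySem.Dict.empty]
    simp [PySem.Set.update_nil_left]
  have hkR : ((l.map (pvKey w)).foldl
      (fun d c => d.insert c (l.filter (fun i => pvKey w i == c)))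
      PySem.Dict.empty).keys = PySem.Set.ofList (l.map (pvKey w)) := by
    rw [PySem.Dict.keys_foldl_insert (l.map (pvKey w))
      (fun _ c => l.filter (fun i => pvKey w i == c)) PySem.Dict.empty]
    simp [PySem.Set.update_nil_left]
  have hndL : (l.foldl (fun d i => d.modify (pvKey w i) [] (fun v => v ++ [i]))
      PySem.Dict.empty).keys.Nodup :=
    PySem.Dict.nodup_keys_foldl_modify_key l (pvKey w) [] (fun _ i v => v ++ [i])
      PySem.Dict.empty (by simp)
  have hndR : ((l.map (pvKey w)).foldl
      (fun d c => d.insert c (l.filter (fun i => pvKey w i == c)))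
      PySem.Dict.empty).keys.Nodup :=
    PySem.Dict.nodup_keys_foldl_insert (l.map (pvKey w))
      (fun _ c => l.filter (fun i => pvKey w i == c)) PySem.Dict.empty (by simp)
  rw [PySem.Dict.items_eq_map_keys _ hndL [], PySem.Dict.items_eq_map_keys _ hndR [],
    hkL, hkR]
  apply List.map_congr_left
  intro c hc
  have hcm : c ∈ l.map (pvKey w) := (PySem.Set.mem_ofList _ c).mp hc
  have hR : ((l.map (pvKey w)).foldl
      (fun d c => d.insert c (l.filter (fun i => pvKey w i == c)))
      PySem.Dict.empty).getD c [] = l.filter (fun i => pvKey w i == c) := by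
    rw [getD_foldl_insert_const (fun c => l.filter (fun i => pvKey w i == c))]
    simp [hcm]
  have hfold : l.foldl (fun d i => d.modify (pvKey w i) [] (fun v => v ++ [i]))
        PySem.Dict.empty
      = (l.map (fun i => (pvKey w i, i))).foldl
          (fun d p => d.modify p.1 [] (fun v => v ++ [p.2])) PySem.Dict.empty := by
    rw [List.foldl_map]
  have hL2 : (l.foldl (fun d i => d.modify (pvKey w i) [] (fun v => v ++ [i]))
      PySem.Dict.empty).getD c [] = l.filter (fun i => pvKey w i == c) := by
    rw [hfold, PySem.Dict.getD_foldl_modify_append]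
    simp [List.filter_map, Function.comp_def, List.map_map]
  rw [hR, hL2]

-- B's grouped(flag) in terms of the flagged index list
theorem pvGrouped_eq (w r : List Char) (flag : Char) :
    pvGrouped w r flag
      = (((PySem.List.pyRange 0 5 1).filter
            (fun i => PySem.List.pyGetD r i ' ' == flag)).map (pvKey w)).foldl
          (fun d c => d.insert c (((PySem.List.pyRange 0 5 1).filter
              (fun i => PySem.List.pyGetD r i ' ' == flag)).filter
              (fun i => pvKey w i == c)))
          PySem.Dict.empty := by
  unfold pvGrouped pvKey
  dsimp only
  congr 1
  funext d c
  rw [List.filter_filter]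
  exact congrArg _ (List.filter_congr (fun i _ => Bool.and_comm _ _))

-- A's classification fold computes the three filters.
theorem classify_fold_eq (r : List Char) (l : List Int) (e p g : List Int) :
    l.foldl
      (fun (st : List Int × List Int × List Int) index =>
        let result := PySem.List.pyGetD r index ' '
        if result == 'g' then (st.1 ++ [index], st.2.1, st.2.2)
        else if result == 'y' then (st.1, st.2.1 ++ [index], st.2.2)
        else (st.1, st.2.1, st.2.2 ++ [index]))
      (e, p, g)
    = (e ++ l.filter (fun i => PySem.List.pyGetD r i ' ' == 'g'),
       p ++ l.filter (fun i => !(PySem.List.pyGetD r i ' ' == 'g') && (PySem.List.pyGetD r i ' ' == 'y')),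
       g ++ l.filter (fun i => !(PySem.List.pyGetD r i ' ' == 'g') && !(PySem.List.pyGetD r i ' ' == 'y'))) := by
  induction l generalizing e p g with
  | nil => simp
  | cons i t ih =>
    rw [List.foldl_cons]
    by_cases hg : PySem.List.pyGetD r i ' ' = 'g'
    · simp only [List.filter_cons]
      rw [show (let result := PySem.List.pyGetD r i ' '; if result == 'g' then (e ++ [i], p, g)
          else if result == 'y' then (e, p ++ [i], g) else (e, p, g ++ [i])) = (e ++ [i], p, g) by
        simp [hg]]
      rw [ih]
      simp [hg]
    · by_cases hy : PySem.List.pyGetD r i ' ' = 'y'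
      · simp only [List.filter_cons]
        rw [show (let result := PySem.List.pyGetD r i ' '; if result == 'g' then (e ++ [i], p, g)
            else if result == 'y' then (e, p ++ [i], g) else (e, p, g ++ [i])) = (e, p ++ [i], g) by
          simp [hy]]
        rw [ih]
        simp [hy]
      · simp only [List.filter_cons]
        rw [show (let result := PySem.List.pyGetD r i ' '; if result == 'g' then (e ++ [i], p, g)
            else if result == 'y' then (e, p ++ [i], g) else (e, p, g ++ [i])) = (e, p, g ++ [i]) by
          simp [hg, hy]]
        rw [ih]
        simp [hg, hy]

-- yellow squares cannot be green: the classification filter for 'y' simplifies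
theorem filter_y_eq (r : List Char) :
    (PySem.List.pyRange 0 5 1).filter
        (fun i => !(PySem.List.pyGetD r i ' ' == 'g') && (PySem.List.pyGetD r i ' ' == 'y'))
      = (PySem.List.pyRange 0 5 1).filter (fun i => PySem.List.pyGetD r i ' ' == 'y') := by
  apply List.filter_congr
  intro i _
  by_cases h : PySem.List.pyGetD r i ' ' = 'y' <;> simp [h]

-- boolean regrouping of the grey-square condition
theorem pvBool (a b c d : Bool) : ((a && b) && (c && d)) = (c && (d && (a && b))) := by
  revert a b c d; decide

-- ===== VERDICT (by name: the statement is the Claim_ definition above) =====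
theorem get_subreports_py_spec : Claim_equal_get_subreports_py := by
  intro word results _ _
  show get_subreports_py word results = get_subreports_py_alt word results
  unfold get_subreports_py get_subreports_py_alt
  simp only [classify_fold_eq, List.nil_append, pvGrouped_eq, filter_y_eq,
    pvGenSubreport_eq_grouped, PySem.List.foldl_append_if, List.filter_filter]
  refine congrArg (fun z => (_, _, PySem.Set.ofList z)) (congrArg _ (List.filter_congr ?_))
  intro i _
  exact pvBool _ _ _ _
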